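-- pv_equiv track=rewrite | github.com/thomasnormal/circt | utils/mutation_mcy/lib/native_mutation_plan.py | order_ops
-- ===== SOURCE A (Python) =====
-- def order_ops(base_ops: list[str], applicable: list[str]) -> list[str]:
--     if not applicable:
--         return list(base_ops)
--     ordered: list[str] = []
--     for op in applicable:
--         if op in base_ops and op not in ordered:
--             ordered.append(op)
--     for op in base_ops:
--         if op not in ordered:
--             ordered.append(op)
--     return ordered
-- ===== SOURCE B (Python) =====
-- def order_ops(base_ops: list[str], applicable: list[str]) -> list[str]:
--     if not applicable:
--         return list(base_ops)
--     rank = {}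
--     for i, op in enumerate(applicable):
--         rank.setdefault(op, i)
--     deduped = list(dict.fromkeys(base_ops))
--     n = len(applicable)
--     key = {op: rank.get(op, n + i) for i, op in enumerate(deduped)}
--     return sorted(deduped, key=key.__getitem__)
-- ===== Notes on version B (the rewrite author's own statement) =====
-- stated objective: faster
-- what changed: Replaces A's two filtering passes with linear membership scans by a first-occurrence rank table over applicable plus an ordered dedup of base_ops and one stable priority sort by precomputed keys.
import Mathlib
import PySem

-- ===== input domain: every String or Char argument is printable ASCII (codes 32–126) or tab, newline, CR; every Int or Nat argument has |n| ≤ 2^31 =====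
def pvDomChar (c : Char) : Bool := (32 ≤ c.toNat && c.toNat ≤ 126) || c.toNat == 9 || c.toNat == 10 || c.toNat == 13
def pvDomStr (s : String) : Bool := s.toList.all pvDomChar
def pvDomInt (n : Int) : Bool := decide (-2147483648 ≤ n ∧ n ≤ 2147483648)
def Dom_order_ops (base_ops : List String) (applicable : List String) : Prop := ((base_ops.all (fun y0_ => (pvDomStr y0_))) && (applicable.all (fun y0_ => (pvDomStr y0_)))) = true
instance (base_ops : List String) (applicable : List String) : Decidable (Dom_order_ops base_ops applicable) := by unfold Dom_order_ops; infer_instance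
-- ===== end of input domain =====

-- B replaces A's two filtering passes (each testing membership by scanning lists) by a
-- first-occurrence rank table over applicable, an ordered dedup of base_ops and one
-- sort of the deduped list by precomputed integer keys.

-- ===== PORT A =====
def order_ops (base_ops : List String) (applicable : List String) : List String :=
  if applicable = [] then base_ops
  else
    let ordered := applicable.foldl
      (fun acc op => if op ∈ base_ops ∧ op ∉ acc then acc ++ [op] else acc) []
    base_ops.foldl (fun acc op => if op ∉ acc then acc ++ [op] else acc) ordered

-- ===== PORT B =====
def order_ops_alt (base_ops : List String) (applicable : List String) : List String :=
  if applicable = [] then base_ops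
  else
    let rank : PySem.Dict String Int :=
      (PySem.List.enumerate applicable 0).foldl
        (fun d p => PySem.Dict.setdefault d p.2 p.1) PySem.Dict.empty
    let deduped := PySem.List.dedup base_ops
    let n : Int := (applicable.length : Int)
    let key : PySem.Dict String Int :=
      (PySem.List.enumerate deduped 0).foldl
        (fun d p => PySem.Dict.insert d p.2 (PySem.Dict.getD rank p.2 (n + p.1))) PySem.Dict.empty
    PySem.List.sorted deduped (fun op => PySem.Dict.getD key op 0) false

-- ===== PRECONDITION & SPEC =====
def Spec_order_ops (base_ops : List String) (applicable : List String) (out : List String) : Prop := out = order_ops_alt base_ops applicable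
instance (base_ops : List String) (applicable : List String) (out : List String) : Decidable (Spec_order_ops base_ops applicable out) := by unfold Spec_order_ops; infer_instance

-- ===== CLAIM (what is proved, stated in full; the proofs are below) =====
def Claim_equal_order_ops : Prop := ∀ (base_ops : List String) (applicable : List String), Dom_order_ops base_ops applicable → Spec_order_ops base_ops applicable (order_ops base_ops applicable)

-- ===== LEMMAS AND PROOFS =====

theorem pv_idxOf?_of_mem {l : List String} {v : String} (h : v ∈ l) :
    List.idxOf? v l = some (l.idxOf v) := by
  induction l with
  | nil => simp at h
  | cons x t ih =>
    by_cases hx : v = x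
    · subst hx; simp [List.idxOf?_cons, List.idxOf_cons_self]
    · simp only [List.mem_cons] at h
      simp [List.idxOf?_cons, List.idxOf_cons_ne _ (fun e => hx e.symm), beq_iff_eq,
        ih (h.resolve_left hx)]
      exact fun e => hx e.symm

theorem pv_rank_get? (l : List String) (s : Int) (d : PySem.Dict String Int) (op : String) :
    (((PySem.List.enumerate l s).foldl
        (fun d p => PySem.Dict.setdefault d p.2 p.1) d).get? op)
      = (d.get? op).or ((PySem.List.index? l op).map (fun k => s + (k : Int))) := by
  induction l generalizing s d with
  | nil =>
    rw [PySem.List.enumerate_nil]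
    simp [PySem.List.index?_eq_idxOf?, List.idxOf?_nil]
  | cons x t ih =>
    rw [PySem.List.enumerate_cons]
    simp only [List.foldl_cons]
    rw [ih]
    by_cases hx : op = x
    · subst hx
      rw [PySem.Dict.get?_setdefault_self, PySem.List.index?_cons_self]
      cases h : d.get? op with
      | none => simp
      | some v => simp
    · rw [PySem.Dict.get?_setdefault_of_ne _ _ hx,
        PySem.List.index?_cons_of_ne _ (Ne.symm hx)]
      cases h : PySem.List.index? t op with
      | none => simp
      | some k =>
        have hk : s + 1 + (k : Int) = s + ((k : Int) + 1) := by ring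
        simp [hk]

theorem pv_key_get? (l : List String) (s : Int) (d : PySem.Dict String Int)
    (f : Int → String → Int) (op : String) (hnd : l.Nodup) :
    (((PySem.List.enumerate l s).foldl
        (fun d p => PySem.Dict.insert d p.2 (f p.1 p.2)) d).get? op)
      = match PySem.List.index? l op with
        | some k => some (f (s + (k : Int)) op)
        | none => d.get? op := by
  induction l generalizing s d with
  | nil => rfl
  | cons x t ih =>
    rw [PySem.List.enumerate_cons]
    simp only [List.foldl_cons]
    rw [ih _ _ hnd.of_cons]
    by_cases hx : op = x
    · subst hx
      rw [PySem.List.index?_cons_self]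
      have hnot : PySem.List.index? t op = none := by
        rw [PySem.List.index?_eq_none_iff]
        exact (List.nodup_cons.mp hnd).1
      rw [hnot]
      simp [PySem.Dict.get?_insert_self]
    · rw [PySem.List.index?_cons_of_ne _ (Ne.symm hx)]
      cases h : PySem.List.index? t op with
      | none => simp [PySem.Dict.get?_insert_of_ne _ _ hx]
      | some k =>
        have hk : s + 1 + (k : Int) = s + (((k : Nat) + 1 : Nat) : Int) := by push_cast; ring
        simp [hk]

theorem pv_ofList_pairwise_idxOf (l : List String) :
    (PySem.Set.ofList l).Pairwise (fun a b => l.idxOf a < l.idxOf b) := by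
  induction l with
  | nil => simp [PySem.Set.ofList_nil]
  | cons x t ih =>
    rw [PySem.Set.ofList_cons]
    refine List.Pairwise.cons ?_ ?_
    · intro b hb
      have hbx : b ≠ x := by
        have := (PySem.Set.mem_discard _ _ _).mp hb
        exact this.2
      rw [List.idxOf_cons_self, List.idxOf_cons_ne _ (Ne.symm hbx)]
      omega
    · have hd : (PySem.Set.ofList t).discard x
          = (PySem.Set.ofList t).filter (fun y => !y == x) := rfl
      rw [hd]
      refine List.Pairwise.imp_of_mem ?_ (List.Pairwise.filter _ ih)
      intro a b ha hb hab
      have hax : a ≠ x := by simpa using (List.mem_filter.mp ha).2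
      have hbx : b ≠ x := by simpa using (List.mem_filter.mp hb).2
      rw [List.idxOf_cons_ne _ (Ne.symm hax), List.idxOf_cons_ne _ (Ne.symm hbx)]
      omega

theorem pv_ofList_filter (l : List String) (p : String → Bool) :
    PySem.Set.ofList (l.filter p) = (PySem.Set.ofList l).filter p := by
  induction l with
  | nil => simp [PySem.Set.ofList_nil]
  | cons x t ih =>
    by_cases hp : p x
    · rw [List.filter_cons_of_pos hp, PySem.Set.ofList_cons, PySem.Set.ofList_cons,
        List.filter_cons_of_pos hp, ih]
      show _ :: List.filter _ (List.filter _ _) = _ :: List.filter _ (List.filter _ _)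
      rw [List.filter_filter, List.filter_filter]
      congr 1
      apply List.filter_congr
      intro y _
      simp [Bool.and_comm]
    · rw [List.filter_cons_of_neg hp, PySem.Set.ofList_cons, List.filter_cons_of_neg hp, ih]
      show List.filter p _ = List.filter p (List.filter _ _)
      rw [List.filter_filter]
      apply List.filter_congr
      intro y hy
      cases hyx : (y == x) <;> simp_all [PySem.Set.mem_ofList]

theorem pv_main (base_ops : List String) (applicable : List String) :
    order_ops base_ops applicable = order_ops_alt base_ops applicable := by
  by_cases hap : applicable = []
  · simp [order_ops, order_ops_alt, hap]
  · simp only [order_ops, order_ops_alt, if_neg hap]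
    set p : String → Bool := fun op => decide (op ∈ base_ops) with hp
    set F : List String := PySem.Set.ofList (applicable.filter p) with hF
    set deduped : List String := PySem.List.dedup base_ops with hdd
    have hddo : deduped = PySem.Set.ofList base_ops := PySem.List.dedup_eq_ofList base_ops
    set R : List String := deduped.filter (fun y => !(PySem.Set.contains F y)) with hR
    -- A side
    have hstep1 : (fun (acc : List String) op => if op ∈ base_ops ∧ op ∉ acc then acc ++ [op] else acc)
        = (fun acc op => if op ∈ base_ops then PySem.Set.add acc op else acc) := by
      funext acc op
      by_cases h1 : op ∈ base_ops
      · by_cases h2 : op ∈ acc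
        · simp [h1, h2]
        · simp [h1, h2]
      · simp [h1]
    have hstep2 : (fun (acc : List String) op => if op ∉ acc then acc ++ [op] else acc)
        = (fun acc op => PySem.Set.add acc op) := by
      funext acc op
      by_cases h2 : op ∈ acc
      · simp [h2]
      · simp [h2]
    have hA : base_ops.foldl (fun acc op => if op ∉ acc then acc ++ [op] else acc)
        (applicable.foldl
          (fun acc op => if op ∈ base_ops ∧ op ∉ acc then acc ++ [op] else acc) [])
        = F ++ R := by
      rw [hstep1, hstep2]
      rw [PySem.List.foldl_ite_eq_foldl_filter (fun op => op ∈ base_ops) PySem.Set.add]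
      rw [← PySem.Set.ofList_eq_foldl]
      have : base_ops.foldl PySem.Set.add F = PySem.Set.update F base_ops := rfl
      rw [this, PySem.Set.update_eq_append_filter, hR, hddo]
    rw [hA]
    -- B side
    have hnd : deduped.Nodup := by rw [hddo]; exact PySem.Set.nodup_ofList base_ops
    have hFmem : ∀ y, y ∈ F ↔ y ∈ applicable ∧ y ∈ base_ops := by
      intro y
      rw [hF, PySem.Set.mem_ofList, List.mem_filter]
      simp [hp, and_comm]
    have hDmem : ∀ y, y ∈ deduped ↔ y ∈ base_ops := by
      intro y; rw [hddo, PySem.Set.mem_ofList]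
    have hRmem : ∀ y, y ∈ R ↔ y ∈ base_ops ∧ y ∉ applicable := by
      intro y
      rw [hR, List.mem_filter]
      constructor
      · rintro ⟨hyd, hyc⟩
        have hyF : y ∉ F := by
          intro hy
          rw [(PySem.Set.contains_iff F y).mpr hy] at hyc
          simp at hyc
        exact ⟨(hDmem y).mp hyd, fun hya => hyF ((hFmem y).mpr ⟨hya, (hDmem y).mp hyd⟩)⟩
      · rintro ⟨hyb, hya⟩
        refine ⟨(hDmem y).mpr hyb, ?_⟩
        cases hcb : PySem.Set.contains F y with
        | false => rfl
        | true => exact absurd ((PySem.Set.contains_iff F y).mp hcb) (fun hy => hya ((hFmem y).mp hy).1)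
    set n : Int := (applicable.length : Int) with hn
    set rankd : PySem.Dict String Int :=
      (PySem.List.enumerate applicable 0).foldl
        (fun d p => PySem.Dict.setdefault d p.2 p.1) PySem.Dict.empty with hrankd
    set keyd : PySem.Dict String Int :=
      (PySem.List.enumerate deduped 0).foldl
        (fun d p => PySem.Dict.insert d p.2 (PySem.Dict.getD rankd p.2 (n + p.1))) PySem.Dict.empty with hkeyd
    set keyf : String → Int := fun op => PySem.Dict.getD keyd op 0 with hkeyf
    have hrank1 : ∀ op ∈ applicable, rankd.get? op = some ((applicable.idxOf op : Int)) := by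
      intro op hop
      rw [hrankd, pv_rank_get?, PySem.List.index?_eq_idxOf?, pv_idxOf?_of_mem hop]
      simp
    have hrank2 : ∀ op, op ∉ applicable → rankd.get? op = none := by
      intro op hop
      rw [hrankd, pv_rank_get?, (PySem.List.index?_eq_none_iff applicable op).mpr hop]
      rfl
    have hkeyg : ∀ op ∈ deduped,
        keyf op = PySem.Dict.getD rankd op (n + (deduped.idxOf op : Int)) := by
      intro op hop
      rw [hkeyf, hkeyd]
      show (PySem.Dict.getD _ op 0) = _
      rw [PySem.Dict.getD,
        pv_key_get? deduped 0 PySem.Dict.empty (fun i op => PySem.Dict.getD rankd op (n + i)) op hnd,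
        PySem.List.index?_eq_idxOf?, pv_idxOf?_of_mem hop]
      simp
    have hkey1 : ∀ op ∈ deduped, op ∈ applicable → keyf op = (applicable.idxOf op : Int) := by
      intro op hopd hopa
      rw [hkeyg op hopd, PySem.Dict.getD, hrank1 op hopa]
      rfl
    have hkey2 : ∀ op ∈ deduped, op ∉ applicable → keyf op = n + (deduped.idxOf op : Int) := by
      intro op hopd hopa
      rw [hkeyg op hopd, PySem.Dict.getD, hrank2 op hopa]
      rfl
    -- permutation
    have hFnodup : F.Nodup := by rw [hF]; exact PySem.Set.nodup_ofList _
    have hRnodup : R.Nodup := by rw [hR]; exact List.Nodup.filter _ hnd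
    have hCnodup : (F ++ R).Nodup := by
      refine List.Nodup.append hFnodup hRnodup ?_
      intro a haF haR
      exact ((hRmem a).mp haR).2 ((hFmem a).mp haF).1
    have hperm : (F ++ R).Perm deduped := by
      rw [List.perm_ext_iff_of_nodup hCnodup hnd]
      intro a
      rw [List.mem_append, hFmem, hRmem, hDmem]
      constructor
      · rintro (⟨_, hb⟩ | ⟨hb, _⟩) <;> exact hb
      · intro hb
        by_cases ha : a ∈ applicable
        · exact Or.inl ⟨ha, hb⟩
        · exact Or.inr ⟨hb, ha⟩
    -- pairwise keys strictly increase along F ++ R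
    have hpair : (F ++ R).Pairwise (fun a b => keyf a < keyf b) := by
      rw [List.pairwise_append]
      refine ⟨?_, ?_, ?_⟩
      · have h0 := pv_ofList_pairwise_idxOf applicable
        have h1 : F = (PySem.Set.ofList applicable).filter p := by
          rw [hF, pv_ofList_filter]
        rw [h1]
        refine List.Pairwise.imp_of_mem ?_ (List.Pairwise.filter _ h0)
        intro a b ha hb hlt
        rw [← h1] at ha hb
        have haa := (hFmem a).mp ha
        have hbb := (hFmem b).mp hb
        rw [hkey1 a ((hDmem a).mpr haa.2) haa.1, hkey1 b ((hDmem b).mpr hbb.2) hbb.1]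
        exact_mod_cast hlt
      · have h0 := pv_ofList_pairwise_idxOf deduped
        rw [PySem.Set.ofList_eq_self_of_nodup _ hnd] at h0
        rw [hR]
        refine List.Pairwise.imp_of_mem ?_ (List.Pairwise.filter _ h0)
        intro a b ha hb hlt
        rw [← hR] at ha hb
        have haa := (hRmem a).mp ha
        have hbb := (hRmem b).mp hb
        rw [hkey2 a ((hDmem a).mpr haa.1) haa.2, hkey2 b ((hDmem b).mpr hbb.1) hbb.2]
        have : (deduped.idxOf a : Int) < (deduped.idxOf b : Int) := by exact_mod_cast hlt
        omega
      · intro a ha b hb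
        have haa := (hFmem a).mp ha
        have hbb := (hRmem b).mp hb
        rw [hkey1 a ((hDmem a).mpr haa.2) haa.1, hkey2 b ((hDmem b).mpr hbb.1) hbb.2]
        have h1 : (applicable.idxOf a : Int) < n := by
          rw [hn]; exact_mod_cast List.idxOf_lt_length_of_mem haa.1
        have h2 : (0 : Int) ≤ (deduped.idxOf b : Int) := Int.natCast_nonneg _
        omega
    exact (PySem.List.sorted_eq_of_perm_of_pairwise_lt deduped (F ++ R) keyf hperm hpair).symm

-- ===== VERDICT (by name: the statement is the Claim_ definition above) =====
theorem order_ops_spec : Claim_equal_order_ops :=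
  fun base_ops applicable _ => pv_main base_ops applicable
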